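-- pv_equiv track=rewrite | github.com/medchem/breastmeta | reportreading/reportreader.py | is_procedure
-- ===== SOURCE A (Python) =====
-- def is_procedure(word):
--     for procedure in ["surgery", "ectomy", "excision", "resection", "biopsy",
--                     "section", "MRM", "otomy", "BCS", "etomy", "erctomy", "EMR",
--                     "TUR", "SMR", "plasty", "debride", "rection", "endoscopic", "UPPP",
--                     "replace", "TLIF", "rhaphy", "biospy", "FESS", "LMS", "shaving",
--                     "remove", "D&C", "curettage", "take down", "curretage", "removal",
--                     "aspiration", "biops", "LSC", "strip", "delivery", "EAC", "ectom",
--                     "closure", "desis", "TAMIS", "amput"]: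
--         if procedure in word:
--             if "status post" in word:
--                 continue
--             else:
--                 return True
--         else:
--             continue
-- ===== SOURCE B (Python) =====
-- # Keywords pre-grouped by their first character: at each position of the word we
-- # only test the keywords that can possibly start there.
-- _BY_FIRST = {
--     's': ["surgery", "section", "shaving", "strip"],
--     'e': ["ectomy", "excision", "etomy", "erctomy", "endoscopic", "ectom"],
--     'r': ["resection", "rection", "replace", "rhaphy", "remove", "removal"],
--     'b': ["biopsy", "biospy", "biops"],
--     'M': ["MRM"],
--     'o': ["otomy"],
--     'B': ["BCS"],
--     'E': ["EMR", "EAC"],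
--     'T': ["TUR", "TLIF", "TAMIS"],
--     'S': ["SMR"],
--     'p': ["plasty"],
--     'd': ["debride", "delivery", "desis"],
--     'U': ["UPPP"],
--     'F': ["FESS"],
--     'L': ["LMS", "LSC"],
--     'D': ["D&C"],
--     'c': ["curettage", "curretage", "closure"],
--     't': ["take down"],
--     'a': ["aspiration", "amput"],
-- }
--
--
-- def is_procedure(word):
--     if "status post" in word:
--         return None
--     for i, c in enumerate(word):
--         for k in _BY_FIRST.get(c, ()):
--             if word.startswith(k, i):
--                 return True
--     return None
-- ===== Notes on version B (the rewrite author's own statement) =====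
-- stated objective: alternative
-- what changed: Replaces A's per-keyword substring-search loop (with the loop-invariant status-post test inside) by a hoisted status-post guard plus a single left-to-right positional scan of the word that tests at each position only the keywords indexed by that position's character in a precomputed first-character dict.
import Mathlib
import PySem

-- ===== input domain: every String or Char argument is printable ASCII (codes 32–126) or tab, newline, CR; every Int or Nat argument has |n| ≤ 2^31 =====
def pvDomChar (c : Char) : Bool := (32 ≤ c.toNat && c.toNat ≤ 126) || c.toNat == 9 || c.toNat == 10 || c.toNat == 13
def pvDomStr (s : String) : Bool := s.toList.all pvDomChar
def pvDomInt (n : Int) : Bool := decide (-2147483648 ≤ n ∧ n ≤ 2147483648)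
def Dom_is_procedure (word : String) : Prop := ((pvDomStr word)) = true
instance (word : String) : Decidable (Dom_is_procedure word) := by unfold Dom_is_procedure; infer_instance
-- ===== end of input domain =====

-- B replaces A's per-keyword substring-search loop by a hoisted status-post guard plus one
-- left-to-right positional scan of the word, testing at each position only the keywords
-- indexed by that position's character in a precomputed first-character dict (alternative).

-- ===== PORT A =====
def pvKeywords : List String :=
  ["surgery", "ectomy", "excision", "resection", "biopsy", "section", "MRM", "otomy",
   "BCS", "etomy", "erctomy", "EMR", "TUR", "SMR", "plasty", "debride", "rection",
   "endoscopic", "UPPP", "replace", "TLIF", "rhaphy", "biospy", "FESS", "LMS",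
   "shaving", "remove", "D&C", "curettage", "take down", "curretage", "removal",
   "aspiration", "biops", "LSC", "strip", "delivery", "EAC", "ectom", "closure",
   "desis", "TAMIS", "amput"]

-- the 'for procedure in [...]' loop of A, step for step
def pvLoopA : List String → String → Option Bool
  | [], _ => none                                  -- loop falls through: implicit None
  | k :: rest, word =>
      if PySem.Str.isIn k word then
        if PySem.Str.isIn "status post" word then pvLoopA rest word   -- continue
        else some true                                                -- return True
      else pvLoopA rest word                                          -- continue

def is_procedure (word : String) : Option Bool := pvLoopA pvKeywords word

-- ===== PORT B =====
-- Source B's module-level _BY_FIRST dict literal: keywords grouped by first character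
def pvByFirst : PySem.Dict Char (List String) := PySem.Dict.mk
  [('s', ["surgery", "section", "shaving", "strip"]),
   ('e', ["ectomy", "excision", "etomy", "erctomy", "endoscopic", "ectom"]),
   ('r', ["resection", "rection", "replace", "rhaphy", "remove", "removal"]),
   ('b', ["biopsy", "biospy", "biops"]),
   ('M', ["MRM"]),
   ('o', ["otomy"]),
   ('B', ["BCS"]),
   ('E', ["EMR", "EAC"]),
   ('T', ["TUR", "TLIF", "TAMIS"]),
   ('S', ["SMR"]),
   ('p', ["plasty"]),
   ('d', ["debride", "delivery", "desis"]),
   ('U', ["UPPP"]),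
   ('F', ["FESS"]),
   ('L', ["LMS", "LSC"]),
   ('D', ["D&C"]),
   ('c', ["curettage", "curretage", "closure"]),
   ('t', ["take down"]),
   ('a', ["aspiration", "amput"])]

-- Source B's 'for i, c in enumerate(word): for k in _BY_FIRST.get(c, ()): if word.startswith(k, i): return True'
-- word.startswith(k, i) with 0 ≤ i (enumerate indices) is exactly k.toList.isPrefixOf (drop i)
def pvScanB (w : List Char) : List (Int × Char) → Option Bool
  | [] => none                                     -- scan exhausted: return None
  | (i, c) :: rest =>
      if (PySem.Dict.getD pvByFirst c []).any (fun k => k.toList.isPrefixOf (w.drop i.toNat))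
      then some true                               -- return True on first position that matches
      else pvScanB w rest

def is_procedure_alt (word : String) : Option Bool :=
  if PySem.Str.isIn "status post" word then none
  else pvScanB word.toList (PySem.List.enumerate word.toList)

-- ===== PRECONDITION & SPEC =====
def Spec_is_procedure (word : String) (out : Option Bool) : Prop := out = is_procedure_alt word
instance (word : String) (out : Option Bool) : Decidable (Spec_is_procedure word out) := by
  unfold Spec_is_procedure; infer_instance

-- ===== CLAIM =====
def Claim_equal_is_procedure : Prop :=
  ∀ (word : String), Dom_is_procedure word → Spec_is_procedure word (is_procedure word)

-- ===== LEMMAS AND PROOFS =====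

-- A's loop, characterised
theorem pvLoopA_eq (kws : List String) (word : String) :
    pvLoopA kws word =
      if PySem.Str.isIn "status post" word then none
      else if kws.any (fun k => PySem.Str.isIn k word) then some true else none := by
  induction kws with
  | nil => simp [pvLoopA]
  | cons k rest ih =>
      simp only [pvLoopA, List.any_cons, ih, PySem.Str.isIn]
      by_cases hs : PySem.Chars.isIn "status post".toList word.toList <;>
        by_cases hk : PySem.Chars.isIn k.toList word.toList <;>
          simp_all

-- B's scan, characterised
theorem pvScanB_eq (w : List Char) (l : List (Int × Char)) :
    pvScanB w l =
      if l.any (fun p => (PySem.Dict.getD pvByFirst p.2 []).any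
          (fun k => k.toList.isPrefixOf (w.drop p.1.toNat))) then some true else none := by
  induction l with
  | nil => simp [pvScanB]
  | cons p rest ih =>
      obtain ⟨i, c⟩ := p
      cases hX : (PySem.Dict.getD pvByFirst c []).any
          (fun k => k.toList.isPrefixOf (w.drop i.toNat)) with
      | true => simp [pvScanB, hX]
      | false =>
          have h1 : pvScanB w ((i, c) :: rest) = pvScanB w rest := by
            simp [pvScanB, hX]
          rw [h1, ih, List.any_cons, hX, Bool.false_or]

set_option maxRecDepth 10000 in
theorem pvItems_sound : ∀ p ∈ (pvByFirst).items, ∀ k ∈ p.2, k ∈ pvKeywords := by decide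

set_option maxRecDepth 10000 in
theorem pvKw_ne_nil : ∀ k ∈ pvKeywords, k.toList ≠ [] := by decide

set_option maxRecDepth 10000 in
theorem pvMem_group_complete :
    ∀ k ∈ pvKeywords, k ∈ PySem.Dict.getD pvByFirst (k.toList.headD 'x') [] := by decide

theorem pvMem_group_sound (c : Char) (k : String)
    (h : k ∈ PySem.Dict.getD pvByFirst c []) : k ∈ pvKeywords := by
  cases hv : PySem.Dict.get? pvByFirst c with
  | none =>
      rw [PySem.Dict.getD_of_get?_eq_none pvByFirst [] hv] at h
      simp at h
  | some v =>
      rw [PySem.Dict.getD_of_get?_eq_some pvByFirst [] hv] at h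
      exact pvItems_sound (c, v) (PySem.Dict.mem_items_of_get?_eq_some pvByFirst hv) k h

-- the positional first-char-indexed scan finds a hit iff some keyword occurs in w
theorem pvAny_hit_eq (w : List Char) :
    ((PySem.List.enumerate w).any (fun p => (PySem.Dict.getD pvByFirst p.2 []).any
        (fun k => k.toList.isPrefixOf (w.drop p.1.toNat))))
      = pvKeywords.any (fun k => PySem.Chars.isIn k.toList w) := by
  rw [Bool.eq_iff_iff]
  simp only [List.any_eq_true]
  constructor
  · rintro ⟨p, hp, k, hk, hpre⟩
    rw [PySem.List.mem_enumerate_iff] at hp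
    obtain ⟨j, hj, rfl⟩ := hp
    refine ⟨k, pvMem_group_sound _ _ hk, ?_⟩
    rw [PySem.Chars.isIn_iff_infix]
    have hpre' : k.toList <+: w.drop j := by
      rw [List.isPrefixOf_iff_prefix] at hpre
      simpa using hpre
    exact hpre'.isInfix.trans (List.drop_suffix j w).isInfix
  · rintro ⟨k, hk, hin⟩
    rw [PySem.Chars.isIn_iff_infix] at hin
    obtain ⟨s, t, hst⟩ := hin
    have hne : k.toList ≠ [] := pvKw_ne_nil k hk
    have hdrop : w.drop s.length = k.toList ++ t := by
      rw [← hst, List.append_assoc, List.drop_left]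
    have hkpos : 0 < k.toList.length := List.length_pos_iff.mpr hne
    have hj : s.length < w.length := by
      have hlen := congrArg List.length hdrop
      rw [List.length_drop, List.length_append] at hlen
      omega
    obtain ⟨a, ta, hco⟩ := List.exists_cons_of_ne_nil hne
    have hget : w[s.length] = a := by
      have h1 : w[s.length]? = some a := by
        rw [← List.head?_drop, hdrop, hco]; rfl
      simpa [List.getElem?_eq_getElem hj] using h1
    have hheadD : k.toList.headD 'x' = a := by rw [hco]; rfl
    refine ⟨((s.length : Int), w[s.length]), ?_, k, ?_, ?_⟩
    · rw [PySem.List.mem_enumerate_iff]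
      exact ⟨s.length, hj, by simp⟩
    · show k ∈ PySem.Dict.getD pvByFirst w[s.length] []
      rw [hget, ← hheadD]
      exact pvMem_group_complete k hk
    · show k.toList.isPrefixOf (w.drop ((s.length : Int)).toNat) = true
      rw [Int.toNat_natCast, List.isPrefixOf_iff_prefix, hdrop]
      exact List.prefix_append _ _

-- ===== VERDICT =====
theorem is_procedure_spec : Claim_equal_is_procedure := by
  intro word _
  unfold Spec_is_procedure is_procedure is_procedure_alt
  rw [pvLoopA_eq, pvScanB_eq, pvAny_hit_eq]
  simp [PySem.Str.isIn]
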